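-- pv_equiv track=rewrite | github.com/jorlyf/ege-informatics | 5 задание/13.py | f
-- ===== SOURCE A (Python) =====
-- def f(N):
--     n = bin(N)[2:]
--     ni = ""
--     for q in n:
--         if q == "1": q = "0"
--         else: q = "1"
--         ni += q
--     ni = int(ni, 2)
--     return N - ni
-- ===== SOURCE B (Python) =====
-- def f(N):
--     L = N.bit_length() or 1
--     return 2 * N - (1 << L) + 1
-- ===== Notes on version B (the rewrite author's own statement) =====
-- stated objective: simpler
-- what changed: Replaced the character-by-character bit complement loop and re-parse with the closed form 2*N - 2^L + 1, with L computed numerically as N.bit_length() (or 1 for N=0) instead of via the binary string.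
-- outside the precondition, e.g. on f(-5): A returns -15, B returns -17
import Mathlib
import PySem

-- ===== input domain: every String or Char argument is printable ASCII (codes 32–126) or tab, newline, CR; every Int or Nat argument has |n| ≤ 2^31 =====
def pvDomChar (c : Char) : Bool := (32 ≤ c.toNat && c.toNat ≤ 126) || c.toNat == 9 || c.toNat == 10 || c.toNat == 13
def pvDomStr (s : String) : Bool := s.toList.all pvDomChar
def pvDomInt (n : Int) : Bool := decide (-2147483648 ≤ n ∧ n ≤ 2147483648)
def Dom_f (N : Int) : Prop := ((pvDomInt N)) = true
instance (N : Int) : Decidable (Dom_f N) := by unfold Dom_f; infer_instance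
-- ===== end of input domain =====

-- B replaces A's per-character bit-complement loop with the closed form 2*N - 2^L + 1,
-- L computed numerically as bit_length (no binary string at all); simpler.

-- ===== PORT A =====
-- the digit part of Python's bin(n) for n > 0 (MSB first)
def natBits (n : Nat) : List Char :=
  if n = 0 then [] else natBits (n / 2) ++ [if n % 2 = 1 then '1' else '0']
decreasing_by exact Nat.div_lt_self (Nat.pos_of_ne_zero (by omega)) (by norm_num)

-- bin(N)[2:] as a list of chars (for N < 0 the '-' sign makes it 'b' ++ digits)
def pyBinTail (N : Int) : List Char :=
  if N < 0 then 'b' :: natBits (-N).toNat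
  else if N = 0 then ['0'] else natBits N.toNat

def f (N : Int) : Int :=
  let n := pyBinTail N
  let ni := n.foldl (fun acc q => acc ++ [if q = '1' then '0' else '1']) []
  let niv := ni.foldl (fun acc c => 2 * acc + (if c = '1' then 1 else 0)) (0 : Int)
  N - niv

-- ===== PORT B =====
-- Python's int.bit_length (argument taken by absolute value)
def natBitLen (n : Nat) : Nat :=
  if n = 0 then 0 else natBitLen (n / 2) + 1
decreasing_by exact Nat.div_lt_self (Nat.pos_of_ne_zero (by omega)) (by norm_num)

def f_alt (N : Int) : Int :=
  let L := max (natBitLen N.natAbs) 1   -- N.bit_length() or 1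
  2 * N - 2 ^ L + 1

-- ===== PRECONDITION & SPEC =====
-- Pre_ excludes negative N: there the '-' sign makes bin's digit string start with a stray 'b',
-- so A's returned value comes from complementing that character — an accident no caller would
-- specify — and B's closed form gives a different, equally unspecified value.
def Pre_f (N : Int) : Prop := 0 ≤ N
instance (N : Int) : Decidable (Pre_f N) := by unfold Pre_f; infer_instance
def pvWitness_f : Int := (5)
def Spec_f (N : Int) (out : Int) : Prop := out = f_alt N
instance (N : Int) (out : Int) : Decidable (Spec_f N out) := by unfold Spec_f; infer_instance

-- ===== CLAIM (what is proved, stated in full; the proofs are below) =====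
def Claim_equal_f : Prop := ∀ (N : Int), Dom_f N → Pre_f N → Spec_f N (f N)

-- ===== LEMMAS AND PROOFS =====

def bitVal (l : List Char) : Int :=
  l.foldl (fun acc c => 2 * acc + (if c = '1' then 1 else 0)) (0 : Int)

def only01 (l : List Char) : Prop := ∀ c ∈ l, c = '0' ∨ c = '1'

theorem foldl_app_map (g : Char → Char) (l : List Char) (acc : List Char) :
    l.foldl (fun a q => a ++ [g q]) acc = acc ++ l.map g := by
  induction l generalizing acc with
  | nil => simp
  | cons c t ih => simp [List.foldl, ih]

theorem bitVal_append (l : List Char) (c : Char) :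
    bitVal (l ++ [c]) = 2 * bitVal l + (if c = '1' then 1 else 0) := by
  simp [bitVal, List.foldl_append]

theorem bitVal_comp (l : List Char) (h : only01 l) :
    bitVal (l.map (fun q => if q = '1' then '0' else '1'))
      = 2 ^ l.length - 1 - bitVal l := by
  induction l using List.reverseRecOn with
  | nil => simp [bitVal]
  | append_singleton t c ih =>
      have ht : only01 t := fun x hx => h x (List.mem_append_left _ hx)
      have hc : c = '0' ∨ c = '1' := h c (by simp)
      simp only [List.map_append, List.map_cons, List.map_nil, bitVal_append,
        List.length_append, List.length_cons, List.length_nil]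
      rw [ih ht]
      rcases hc with hc | hc <;> subst hc <;> simp <;> ring

theorem only01_natBits (n : Nat) : only01 (natBits n) := by
  induction n using Nat.strong_induction_on with
  | _ n ih =>
      rw [natBits]
      by_cases h : n = 0
      · simp [h, only01]
      · rw [if_neg h]
        intro c hc
        rcases List.mem_append.1 hc with hc | hc
        · exact ih (n / 2) (Nat.div_lt_self (Nat.pos_of_ne_zero h) (by norm_num)) c hc
        · simp only [List.mem_singleton] at hc
          subst hc; split <;> simp

theorem bitVal_natBits (n : Nat) : bitVal (natBits n) = (n : Int) := by
  induction n using Nat.strong_induction_on with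
  | _ n ih =>
      rw [natBits]
      by_cases h : n = 0
      · simp [h, bitVal]
      · rw [if_neg h, bitVal_append,
          ih (n / 2) (Nat.div_lt_self (Nat.pos_of_ne_zero h) (by norm_num))]
        by_cases hm : n % 2 = 1
        · rw [if_pos hm, if_pos rfl]; omega
        · rw [if_neg hm, if_neg (by decide : ¬ ('0' : Char) = '1')]; omega

theorem length_natBits (n : Nat) : (natBits n).length = natBitLen n := by
  induction n using Nat.strong_induction_on with
  | _ n ih =>
      rw [natBits, natBitLen]
      by_cases h : n = 0
      · simp [h]
      · rw [if_neg h, if_neg h]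
        simp [ih (n / 2) (Nat.div_lt_self (Nat.pos_of_ne_zero h) (by norm_num))]

theorem natBitLen_pos (n : Nat) (h : n ≠ 0) : 1 ≤ natBitLen n := by
  rw [natBitLen, if_neg h]; omega

theorem length_pyBinTail (N : Int) (h : 0 ≤ N) :
    (pyBinTail N).length = max (natBitLen N.natAbs) 1 := by
  unfold pyBinTail
  rw [if_neg (by omega)]
  by_cases h0 : N = 0
  · simp [h0, natBitLen]
  · rw [if_neg h0, length_natBits]
    have hn : N.natAbs ≠ 0 := by omega
    have : N.toNat = N.natAbs := by omega
    rw [this]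
    exact (Nat.max_eq_left (natBitLen_pos _ hn)).symm

theorem bitVal_pyBinTail (N : Int) (h : 0 ≤ N) : bitVal (pyBinTail N) = N := by
  unfold pyBinTail
  rw [if_neg (by omega)]
  by_cases h0 : N = 0
  · simp [h0, bitVal]
  · rw [if_neg h0, bitVal_natBits, Int.toNat_of_nonneg h]

theorem only01_pyBinTail (N : Int) (h : 0 ≤ N) : only01 (pyBinTail N) := by
  unfold pyBinTail
  rw [if_neg (by omega)]
  by_cases h0 : N = 0
  · simp [h0, only01]
  · rw [if_neg h0]; exact only01_natBits _

-- ===== VERDICT (by name: the statement is the Claim_ definition above) =====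
theorem f_spec : Claim_equal_f := by
  intro N _ hPre
  show f N = f_alt N
  show N - List.foldl (fun acc c => 2 * acc + (if c = '1' then 1 else 0)) (0 : Int)
        (List.foldl (fun (acc : List Char) q => acc ++ [if q = '1' then '0' else '1']) [] (pyBinTail N))
      = 2 * N - 2 ^ (max (natBitLen N.natAbs) 1) + 1
  rw [foldl_app_map, List.nil_append]
  show N - bitVal (List.map _ (pyBinTail N)) = _
  rw [bitVal_comp _ (only01_pyBinTail N hPre), bitVal_pyBinTail N hPre,
    ← length_pyBinTail N hPre]
  ring
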